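-- pv_equiv track=rewrite | github.com/danielcomerio/UVaProblems | uva11926.py | verificaConflitoRepetitivoSimples
-- ===== SOURCE A (Python) =====
-- from copy import deepcopy
--
-- def verificaConflito(tarefaLista, tarefaInput):
--     conflito = False
--
--     if (tarefaInput[0] > tarefaLista[0] and tarefaInput[0] < tarefaLista[1]) or (tarefaInput[1] > tarefaLista[0] and tarefaInput[1] < tarefaLista[1]):
--         conflito = True
--
--     elif (tarefaInput[0] <= tarefaLista[0]) and (tarefaInput[1] >= tarefaLista[1]):
--         conflito = True
--
--     return conflito
--
-- def verificaConflitoRepetitivoSimples(listaTarefas, tarefa):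
--     conflito = False
--
--     for i in range(len(listaTarefas)):
--         tarefa2 = deepcopy(tarefa)
--
--         while tarefa2[0] <= 1000000:
--             conflito = verificaConflito(listaTarefas[i], tarefa2)
--
--             if conflito:
--                 break
--
--             tarefa2[0] += tarefa2[2]
--             tarefa2[1] += tarefa2[2]
--
--
--         if conflito:
--             break
--
--     return conflito
-- ===== SOURCE B (Python) =====
-- # B: O(n) per-query modular/range arithmetic -- for each listed interval, decide by
-- # integer floor/ceil division whether any repetition of the task overlaps it,
-- # instead of stepping the task forward period by period up to 1000000.
--
-- def _overlapsSomeRepetition(intervalo, tarefa):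
--     s = tarefa[0]
--     if s > 1000000:
--         return False  # no repetition is even considered
--     e, p = tarefa[1], tarefa[2]
--     a, b = intervalo[0], intervalo[1]
--     kmax = (1000000 - s) // p  # repetitions k = 0..kmax are considered
--     # k-ranges (as closed integer intervals) where each overlap clause holds:
--     #   a < s+k*p < b ;  a < e+k*p < b ;  s+k*p <= a and e+k*p >= b
--     ranges = (
--         ((a - s) // p + 1, (b - s - 1) // p),
--         ((a - e) // p + 1, (b - e - 1) // p),
--         (-((e - b) // p), (a - s) // p),
--     )
--     return any(max(lo, 0) <= min(hi, kmax) for lo, hi in ranges)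
--
--
-- def verificaConflitoRepetitivoSimples(listaTarefas, tarefa):
--     return any(_overlapsSomeRepetition(intervalo, tarefa) for intervalo in listaTarefas)
-- ===== Notes on version B (the rewrite author's own statement) =====
-- stated objective: faster
-- what changed: Instead of stepping the task forward period by period up to 1000000 and testing every shifted copy against each interval, B decides overlap per interval in O(1) by solving the three overlap clauses for the repetition index k with integer floor/ceiling division and intersecting the resulting k-ranges with [0, (1000000-start)//period].
-- outside the precondition, e.g. on verificaConflitoRepetitivoSimples([[0, 10]], [1, 2, 0]): A returns True, B raises ZeroDivisionError; on verificaConflitoRepetitivoSimples([[0, 10], [5]], [1, 2, 3]): A returns True, B returns True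
import Mathlib
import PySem

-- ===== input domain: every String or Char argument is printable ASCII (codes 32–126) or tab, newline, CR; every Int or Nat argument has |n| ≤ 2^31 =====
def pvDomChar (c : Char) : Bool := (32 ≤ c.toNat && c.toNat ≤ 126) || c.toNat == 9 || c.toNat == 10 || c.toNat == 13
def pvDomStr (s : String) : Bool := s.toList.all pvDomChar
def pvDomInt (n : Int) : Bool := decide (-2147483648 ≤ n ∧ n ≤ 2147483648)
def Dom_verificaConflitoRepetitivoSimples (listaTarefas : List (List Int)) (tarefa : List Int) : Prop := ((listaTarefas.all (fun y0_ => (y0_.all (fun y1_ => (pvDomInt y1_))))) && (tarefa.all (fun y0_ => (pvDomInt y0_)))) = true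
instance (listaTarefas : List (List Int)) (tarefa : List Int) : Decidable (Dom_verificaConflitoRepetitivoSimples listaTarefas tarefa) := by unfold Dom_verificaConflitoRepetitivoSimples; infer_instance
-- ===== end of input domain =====

-- B replaces A's step-by-step repetition of the task (advance by the period until passing
-- 1000000, testing each copy) by closed-form integer range arithmetic per interval: O(n)
-- instead of O(n * 1000000/period).

-- ===== PORT A =====
-- verificaConflito: the helper's two chained conditions, with the interval's bounds a = tarefaLista[0],
-- b = tarefaLista[1] and the (mutated) task's bounds s = tarefa2[0], e = tarefa2[1] passed as scalars.
def pvConflito (a b s e : Int) : Bool :=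
  if (s > a && s < b) || (e > a && e < b) then true
  else if s ≤ a && e ≥ b then true
  else false

-- A's inner 'while tarefa2[0] <= 1000000' loop; the deepcopied list tarefa2 = [s, e, p, ...] is
-- carried as its mutated cells s, e (p never changes). fuel only makes the recursion total;
-- Pre_ guarantees p ≥ 1, under which the fuel chosen below is never exhausted.
def pvAWhile (a b p : Int) : Nat → Int → Int → Bool
  | 0, _, _ => false
  | Nat.succ fuel, s, e =>
    if s ≤ 1000000 then
      if pvConflito a b s e then true
      else pvAWhile a b p fuel (s + p) (e + p)
    else false

-- A's 'for i in range(len(listaTarefas))' loop with the 'if conflito: break'.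
def pvAFor : List (List Int) → List Int → Bool
  | [], _ => false
  | L :: rest, tarefa =>
    if pvAWhile (L.getD 0 0) (L.getD 1 0) (tarefa.getD 2 0)
        ((1000001 - tarefa.getD 0 0).toNat + 1) (tarefa.getD 0 0) (tarefa.getD 1 0) then true
    else pvAFor rest tarefa

def verificaConflitoRepetitivoSimples (listaTarefas : List (List Int)) (tarefa : List Int) : Bool :=
  pvAFor listaTarefas tarefa

-- ===== PORT B =====
-- does the closed integer interval [max(lo,0), min(hi,kmax)] contain a point?
def pvRangeHit (lo hi kmax : Int) : Bool := max lo 0 ≤ min hi kmax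

-- B's _overlapsSomeRepetition: k-ranges where each overlap clause holds, by floor division.
def pvOverlapsRep (intervalo : List Int) (tarefa : List Int) : Bool :=
  let s := tarefa.getD 0 0
  if s > 1000000 then false
  else
    let e := tarefa.getD 1 0
    let p := tarefa.getD 2 0
    let a := intervalo.getD 0 0
    let b := intervalo.getD 1 0
    let kmax := PySem.Int.floordiv (1000000 - s) p
    pvRangeHit (PySem.Int.floordiv (a - s) p + 1) (PySem.Int.floordiv (b - s - 1) p) kmax
    || pvRangeHit (PySem.Int.floordiv (a - e) p + 1) (PySem.Int.floordiv (b - e - 1) p) kmax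
    || pvRangeHit (-(PySem.Int.floordiv (e - b) p)) (PySem.Int.floordiv (a - s) p) kmax

def verificaConflitoRepetitivoSimples_alt (listaTarefas : List (List Int)) (tarefa : List Int) : Bool :=
  listaTarefas.any (fun intervalo => pvOverlapsRep intervalo tarefa)

-- ===== PRECONDITION & SPEC =====
-- Pre_ excludes non-positive periods tarefa[2] (A's while-loop diverges there unless an early
-- repetition already conflicts, and B divides by the period) and index-deficient shapes
-- (tarefa shorter than 3, an interval shorter than 2), on which A raises IndexError unless a
-- conflict short-circuits the access; it keeps the shapes A returns on without reading those
-- cells: an empty task list, and a first start beyond 1000000.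
def Pre_verificaConflitoRepetitivoSimples (listaTarefas : List (List Int)) (tarefa : List Int) : Prop :=
  listaTarefas = []
  ∨ (1 ≤ tarefa.length ∧ tarefa.getD 0 0 > 1000000)
  ∨ (3 ≤ tarefa.length ∧ (∀ l ∈ listaTarefas, 2 ≤ l.length) ∧ 0 < tarefa.getD 2 0)
instance (listaTarefas : List (List Int)) (tarefa : List Int) : Decidable (Pre_verificaConflitoRepetitivoSimples listaTarefas tarefa) := by unfold Pre_verificaConflitoRepetitivoSimples; infer_instance

def pvWitness_verificaConflitoRepetitivoSimples : List (List Int) × List Int := ([[0, 10]], [1, 2, 3])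

def Spec_verificaConflitoRepetitivoSimples (listaTarefas : List (List Int)) (tarefa : List Int) (out : Bool) : Prop := out = verificaConflitoRepetitivoSimples_alt listaTarefas tarefa
instance (listaTarefas : List (List Int)) (tarefa : List Int) (out : Bool) : Decidable (Spec_verificaConflitoRepetitivoSimples listaTarefas tarefa out) := by unfold Spec_verificaConflitoRepetitivoSimples; infer_instance

-- ===== CLAIM (what is proved, stated in full; the proofs are below) =====
def Claim_equal_verificaConflitoRepetitivoSimples : Prop := ∀ (listaTarefas : List (List Int)) (tarefa : List Int), Dom_verificaConflitoRepetitivoSimples listaTarefas tarefa → Pre_verificaConflitoRepetitivoSimples listaTarefas tarefa → Spec_verificaConflitoRepetitivoSimples listaTarefas tarefa (verificaConflitoRepetitivoSimples listaTarefas tarefa)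

-- ===== LEMMAS AND PROOFS =====

-- the overlap predicate as a Prop
def pvC (a b x y : Int) : Prop := (a < x ∧ x < b) ∨ (a < y ∧ y < b) ∨ (x ≤ a ∧ b ≤ y)

theorem pvConflito_iff (a b s e : Int) : pvConflito a b s e = true ↔ pvC a b s e := by
  unfold pvConflito pvC
  split_ifs with h1 h2 <;> simp_all
  omega

theorem pvRangeHit_iff (lo hi kmax : Int) :
    pvRangeHit lo hi kmax = true ↔ ∃ k : Int, 0 ≤ k ∧ lo ≤ k ∧ k ≤ hi ∧ k ≤ kmax := by
  unfold pvRangeHit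
  constructor
  · intro h
    exact ⟨max lo 0, by simp at h ⊢; omega⟩
  · rintro ⟨k, h0, h1, h2, h3⟩
    simp; omega

-- A's while loop returns true iff some repetition within fuel both stays in range and conflicts
theorem pvAWhile_iff (a b p : Int) (hp : 0 < p) : ∀ (fuel : Nat) (s e : Int),
    pvAWhile a b p fuel s e = true ↔
      ∃ k : Nat, k < fuel ∧ s + k * p ≤ 1000000 ∧ pvC a b (s + k * p) (e + k * p) := by
  intro fuel
  induction fuel with
  | zero => intro s e; simp [pvAWhile]
  | succ n ih =>
    intro s e
    by_cases hs : s ≤ 1000000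
    · by_cases hc : pvConflito a b s e = true
      · simp [pvAWhile, hs, hc]
        exact ⟨0, by simpa using ⟨hs, (pvConflito_iff a b s e).mp hc⟩⟩
      · have harg : ∀ (k : ℕ) (x : Int), x + ((k : Int) + 1) * p = (x + p) + (k : Int) * p := by
          intro k x; ring
        simp only [pvAWhile, if_pos hs, if_neg hc, ih]
        constructor
        · rintro ⟨k, hk, hle, hC⟩
          refine ⟨k + 1, by omega, ?_, ?_⟩ <;> (push_cast; simp only [harg]) <;> assumption
        · rintro ⟨k, hk, hle, hC⟩
          cases k with
          | zero =>
            exfalso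
            apply hc
            rw [pvConflito_iff]
            simpa using hC
          | succ m =>
            push_cast [harg] at hle hC
            exact ⟨m, by omega, hle, hC⟩
    · simp only [pvAWhile, if_neg hs]
      constructor
      · intro h; exact absurd h (by simp)
      · rintro ⟨k, _, hle, _⟩
        have : 0 ≤ (k : Int) * p := mul_nonneg (Int.natCast_nonneg k) hp.le
        omega

-- the chosen fuel is never exhausted when p ≥ 1
theorem pvFuel_iff (a b p s e : Int) (hp : 0 < p) :
    (∃ k : Nat, k < (1000001 - s).toNat + 1 ∧ s + k * p ≤ 1000000 ∧ pvC a b (s + k * p) (e + k * p)) ↔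
    (∃ k : Int, 0 ≤ k ∧ s + k * p ≤ 1000000 ∧ pvC a b (s + k * p) (e + k * p)) := by
  constructor
  · rintro ⟨k, _, hle, hC⟩
    exact ⟨(k : Int), Int.natCast_nonneg k, hle, hC⟩
  · rintro ⟨k, h0, hle, hC⟩
    refine ⟨k.toNat, ?_, ?_, ?_⟩
    · have hk : k ≤ k * p := le_mul_of_one_le_right h0 hp
      omega
    · rw [Int.toNat_of_nonneg h0]; exact hle
    · rw [Int.toNat_of_nonneg h0]; exact hC

-- B's per-interval test returns true iff some in-range repetition conflicts
theorem pvOverlapsRep_iff (L tarefa : List Int) (hp : 0 < tarefa.getD 2 0) :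
    pvOverlapsRep L tarefa = true ↔
      ∃ k : Int, 0 ≤ k ∧ tarefa.getD 0 0 + k * tarefa.getD 2 0 ≤ 1000000 ∧
        pvC (L.getD 0 0) (L.getD 1 0) (tarefa.getD 0 0 + k * tarefa.getD 2 0)
          (tarefa.getD 1 0 + k * tarefa.getD 2 0) := by
  set s := tarefa.getD 0 0 with hs'
  set e := tarefa.getD 1 0 with he'
  set p := tarefa.getD 2 0 with hp'
  set a := L.getD 0 0 with ha'
  set b := L.getD 1 0 with hb'
  by_cases hs : s > 1000000
  · simp only [pvOverlapsRep, ← hs', ← he', ← hp', ← ha', ← hb', if_pos hs]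
    constructor
    · intro h; exact absurd h (by simp)
    · rintro ⟨k, h0, hle, _⟩
      have : 0 ≤ k * p := mul_nonneg h0 hp.le
      omega
  · simp only [pvOverlapsRep, ← hs', ← he', ← hp', ← ha', ← hb', if_neg hs,
      Bool.or_eq_true, pvRangeHit_iff]
    constructor
    · rintro ((⟨k, h0, h1, h2, h3⟩ | ⟨k, h0, h1, h2, h3⟩) | ⟨k, h0, h1, h2, h3⟩)
      · refine ⟨k, h0, ?_, Or.inl ⟨?_, ?_⟩⟩
        · have := (PySem.Int.le_floordiv_iff_mul_le (a := 1000000 - s) (q := k) hp).mp h3; omega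
        · have := (PySem.Int.floordiv_lt_iff_lt_mul (a := a - s) (q := k) hp).mp (by omega); omega
        · have := (PySem.Int.le_floordiv_iff_mul_le (a := b - s - 1) (q := k) hp).mp h2; omega
      · refine ⟨k, h0, ?_, Or.inr (Or.inl ⟨?_, ?_⟩)⟩
        · have := (PySem.Int.le_floordiv_iff_mul_le (a := 1000000 - s) (q := k) hp).mp h3; omega
        · have := (PySem.Int.floordiv_lt_iff_lt_mul (a := a - e) (q := k) hp).mp (by omega); omega
        · have := (PySem.Int.le_floordiv_iff_mul_le (a := b - e - 1) (q := k) hp).mp h2; omega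
      · refine ⟨k, h0, ?_, Or.inr (Or.inr ⟨?_, ?_⟩)⟩
        · have := (PySem.Int.le_floordiv_iff_mul_le (a := 1000000 - s) (q := k) hp).mp h3; omega
        · have := (PySem.Int.le_floordiv_iff_mul_le (a := a - s) (q := k) hp).mp h2; omega
        · have := (PySem.Int.le_floordiv_iff_mul_le (a := e - b) (q := -k) hp).mp (by omega)
          rw [neg_mul] at this; omega
    · rintro ⟨k, h0, hle, (⟨hA, hB⟩ | ⟨hA, hB⟩ | ⟨hA, hB⟩)⟩
      · refine Or.inl (Or.inl ⟨k, h0, ?_, ?_, ?_⟩)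
        · have := (PySem.Int.floordiv_lt_iff_lt_mul (a := a - s) (q := k) hp).mpr (by omega); omega
        · exact (PySem.Int.le_floordiv_iff_mul_le (a := b - s - 1) (q := k) hp).mpr (by omega)
        · exact (PySem.Int.le_floordiv_iff_mul_le (a := 1000000 - s) (q := k) hp).mpr (by omega)
      · refine Or.inl (Or.inr ⟨k, h0, ?_, ?_, ?_⟩)
        · have := (PySem.Int.floordiv_lt_iff_lt_mul (a := a - e) (q := k) hp).mpr (by omega); omega
        · exact (PySem.Int.le_floordiv_iff_mul_le (a := b - e - 1) (q := k) hp).mpr (by omega)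
        · exact (PySem.Int.le_floordiv_iff_mul_le (a := 1000000 - s) (q := k) hp).mpr (by omega)
      · refine Or.inr ⟨k, h0, ?_, ?_, ?_⟩
        · have h3 : (-k) * p ≤ e - b := by rw [neg_mul]; omega
          have := (PySem.Int.le_floordiv_iff_mul_le (a := e - b) (q := -k) hp).mpr h3; omega
        · exact (PySem.Int.le_floordiv_iff_mul_le (a := a - s) (q := k) hp).mpr (by omega)
        · exact (PySem.Int.le_floordiv_iff_mul_le (a := 1000000 - s) (q := k) hp).mpr (by omega)

-- per interval, A's stepped loop equals B's closed-form test (p > 0)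
theorem pvPerInterval (L tarefa : List Int) (hp : 0 < tarefa.getD 2 0) :
    pvAWhile (L.getD 0 0) (L.getD 1 0) (tarefa.getD 2 0)
      ((1000001 - tarefa.getD 0 0).toNat + 1) (tarefa.getD 0 0) (tarefa.getD 1 0)
    = pvOverlapsRep L tarefa := by
  rw [Bool.eq_iff_iff]
  rw [pvAWhile_iff _ _ _ hp, pvFuel_iff _ _ _ _ _ hp, pvOverlapsRep_iff _ _ hp]

-- the outer loops agree elementwise (p > 0)
theorem pvFor_eq_any (tarefa : List Int) (hp : 0 < tarefa.getD 2 0) :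
    ∀ lista : List (List Int), pvAFor lista tarefa = lista.any (fun L => pvOverlapsRep L tarefa) := by
  intro lista
  induction lista with
  | nil => rfl
  | cons L rest ih =>
    simp only [pvAFor, List.any_cons, pvPerInterval L tarefa hp, ih]
    cases pvOverlapsRep L tarefa <;> simp

-- when the first start already exceeds 1000000 both sides are false
theorem pvFor_big (tarefa : List Int) (hs : tarefa.getD 0 0 > 1000000) :
    ∀ lista : List (List Int), pvAFor lista tarefa = false ∧
      lista.any (fun L => pvOverlapsRep L tarefa) = false := by
  intro lista
  induction lista with
  | nil => exact ⟨rfl, rfl⟩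
  | cons L rest ih =>
    refine ⟨?_, ?_⟩
    · simp only [pvAFor, pvAWhile, if_neg (by omega : ¬ tarefa.getD 0 0 ≤ 1000000)]
      exact ih.1
    · have hfalse : ∀ x : List Int, pvOverlapsRep x tarefa = false := by
        intro x
        simp only [pvOverlapsRep]
        rw [if_pos hs]
      simp [hfalse]

-- ===== VERDICT (by name: the statement is the Claim_ definition above) =====
theorem verificaConflitoRepetitivoSimples_spec : Claim_equal_verificaConflitoRepetitivoSimples := by
  intro lista tarefa _ hpre
  unfold Spec_verificaConflitoRepetitivoSimples verificaConflitoRepetitivoSimples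
    verificaConflitoRepetitivoSimples_alt
  rcases hpre with h | ⟨_, hs⟩ | ⟨_, _, hp⟩
  · subst h; rfl
  · rw [(pvFor_big tarefa hs lista).1, (pvFor_big tarefa hs lista).2]
  · exact pvFor_eq_any tarefa hp lista
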